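-- pv_equiv track=rewrite | github.com/lucasXiaofan/cs520_exercise2 | exercise1_multi_solution_variants/problem_11.py | exchange_sort_gemini_cot
-- ===== SOURCE A (Python) =====
-- def exchange_sort_gemini_cot(sequence):
--     n = len(sequence)
--     sorted_sequence = sorted(sequence)
--
--     count78 = 0
--     count87 = 0
--     count79 = 0
--     count97 = 0
--     count89 = 0
--     count98 = 0
--
--     num7 = sorted_sequence.count(7)
--     num8 = sorted_sequence.count(8)
--
--     for i in range(n):
--         if i < num7:
--             if sequence[i] == 8:
--                 count78 += 1
--             elif sequence[i] == 9:
--                 count79 += 1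
--         elif i < num7 + num8:
--             if sequence[i] == 7:
--                 count87 += 1
--             elif sequence[i] == 9:
--                 count89 += 1
--         else:
--             if sequence[i] == 7:
--                 count97 += 1
--             elif sequence[i] == 8:
--                 count98 += 1
--
--     ans = max(count78, count87) + max(count79, count97) + max(count89, count98) - min(max(count79, count97), max(count89, count98))
--     ans = max(count78, count87) + max(0, count79 + count89 - max(count78, count87))
--
--     return ans
-- ===== SOURCE B (Python) =====
-- def exchange_sort_gemini_cot(sequence):
--     num7 = sequence.count(7)
--     num8 = sequence.count(8)
--     eights_low = sequence[:num7].count(8)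
--     sevens_mid = sequence[num7:num7 + num8].count(7)
--     nines_block = sequence[:num7 + num8].count(9)
--     return max(eights_low, sevens_mid, nines_block)
-- ===== Notes on version B (the rewrite author's own statement) =====
-- stated objective: faster
-- what changed: B drops A's sort, its six-counter index loop and the two-stage max/min formula: it counts 7s and 8s directly, then returns the single maximum of three region counts (8s in the 7-block, 7s in the 8-block, 9s in the combined prefix), using the identity m + max(0, s - m) = max(m, s).
import Mathlib
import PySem

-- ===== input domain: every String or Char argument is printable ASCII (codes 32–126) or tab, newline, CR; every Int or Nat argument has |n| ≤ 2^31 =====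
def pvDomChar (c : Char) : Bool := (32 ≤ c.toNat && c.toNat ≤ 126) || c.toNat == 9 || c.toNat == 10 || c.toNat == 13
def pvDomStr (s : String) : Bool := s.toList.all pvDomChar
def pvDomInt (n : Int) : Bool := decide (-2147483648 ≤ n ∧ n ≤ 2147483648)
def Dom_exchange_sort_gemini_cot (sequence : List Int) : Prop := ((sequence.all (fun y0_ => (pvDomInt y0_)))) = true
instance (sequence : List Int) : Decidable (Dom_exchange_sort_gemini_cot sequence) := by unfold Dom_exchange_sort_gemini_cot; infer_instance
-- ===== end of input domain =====

-- B drops A's sort, its six-counter index loop and the two-stage formula: it returns the single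
-- maximum of three region counts, via the identity m + max(0, s - m) = max(m, s) (objective: faster).

-- ===== PORT A =====
-- the loop body of A, acting on the counter tuple (count78, count87, count79, count97, count89, count98)
def pvCoreA (num7 num8 : Int) (c : Int × Int × Int × Int × Int × Int) (i x : Int) :
    Int × Int × Int × Int × Int × Int :=
  match c with
  | (c78, c87, c79, c97, c89, c98) =>
    if i < num7 then
      if x = 8 then (c78 + 1, c87, c79, c97, c89, c98)
      else if x = 9 then (c78, c87, c79 + 1, c97, c89, c98)
      else (c78, c87, c79, c97, c89, c98)
    else if i < num7 + num8 then
      if x = 7 then (c78, c87 + 1, c79, c97, c89, c98)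
      else if x = 9 then (c78, c87, c79, c97, c89 + 1, c98)
      else (c78, c87, c79, c97, c89, c98)
    else
      if x = 7 then (c78, c87, c79, c97 + 1, c89, c98)
      else if x = 8 then (c78, c87, c79, c97, c89, c98 + 1)
      else (c78, c87, c79, c97, c89, c98)

def exchange_sort_gemini_cot (sequence : List Int) : Int :=
  let n : Int := PySem.List.len sequence
  let sorted_sequence := PySem.List.sorted sequence id false
  let num7 : Int := PySem.List.count sorted_sequence 7
  let num8 : Int := PySem.List.count sorted_sequence 8
  let c := (PySem.List.pyRange 0 n 1).foldl
      (fun c i => pvCoreA num7 num8 c i (PySem.List.pyGetD sequence i 0)) (0, 0, 0, 0, 0, 0)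
  match c with
  | (count78, count87, count79, count97, count89, count98) =>
    -- Python assigns ans twice; the first assignment is immediately overwritten
    let _ans := max count78 count87 + max count79 count97 + max count89 count98
               - min (max count79 count97) (max count89 count98)
    let ans := max count78 count87 + max 0 (count79 + count89 - max count78 count87)
    ans

-- ===== PORT B =====
def exchange_sort_gemini_cot_alt (sequence : List Int) : Int :=
  let num7 : Int := PySem.List.count sequence 7
  let num8 : Int := PySem.List.count sequence 8
  let eights_low : Int := PySem.List.count (PySem.List.slice sequence none (some num7)) 8
  let sevens_mid : Int := PySem.List.count (PySem.List.slice sequence (some num7) (some (num7 + num8))) 7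
  let nines_block : Int := PySem.List.count (PySem.List.slice sequence none (some (num7 + num8))) 9
  max eights_low (max sevens_mid nines_block)

-- ===== PRECONDITION & SPEC =====
def Spec_exchange_sort_gemini_cot (sequence : List Int) (out : Int) : Prop := out = exchange_sort_gemini_cot_alt sequence
instance (sequence : List Int) (out : Int) : Decidable (Spec_exchange_sort_gemini_cot sequence out) := by unfold Spec_exchange_sort_gemini_cot; infer_instance

-- ===== CLAIM =====
def Claim_equal_exchange_sort_gemini_cot : Prop := ∀ (sequence : List Int), Dom_exchange_sort_gemini_cot sequence → Spec_exchange_sort_gemini_cot sequence (exchange_sort_gemini_cot sequence)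

-- ===== LEMMAS AND PROOFS =====

theorem count7_add_count8_le_length (xs : List Int) :
    xs.count 7 + xs.count 8 ≤ xs.length := by
  induction xs with
  | nil => simp
  | cons x xs ih =>
    by_cases h7 : x = 7 <;> by_cases h8 : x = 8 <;>
      simp_all <;> omega

-- region 1: every index is below num7, the loop only counts 8s and 9s
theorem foldA_region1 (num7 num8 : Int) (xs : List Int) :
    ∀ (s : Int) (c78 c87 c79 c97 c89 c98 : Int), s + xs.length ≤ num7 →
    (PySem.List.enumerate xs s).foldl (fun c p => pvCoreA num7 num8 c p.1 p.2)
        (c78, c87, c79, c97, c89, c98)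
      = (c78 + xs.count 8, c87, c79 + xs.count 9, c97, c89, c98) := by
  induction xs with
  | nil => simp [PySem.List.enumerate_nil]
  | cons x xs ih =>
    intro s c78 c87 c79 c97 c89 c98 hs
    rw [List.length_cons] at hs
    push_cast at hs
    have hlt : s < num7 := by omega
    rw [PySem.List.enumerate_cons, List.foldl_cons]
    have hstep : pvCoreA num7 num8 (c78, c87, c79, c97, c89, c98) s x
        = (c78 + (if x = 8 then 1 else 0), c87, c79 + (if x = 9 then 1 else 0), c97, c89, c98) := by
      simp only [pvCoreA, if_pos hlt]
      split_ifs <;> simp_all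
    rw [hstep, ih (s + 1) _ _ _ _ _ _ (by omega)]
    simp only [List.count_cons, Prod.mk.injEq]
    push_cast
    split_ifs <;> simp_all <;> omega

-- region 2: every index is in [num7, num7 + num8), the loop only counts 7s and 9s
theorem foldA_region2 (num7 num8 : Int) (xs : List Int) :
    ∀ (s : Int) (c78 c87 c79 c97 c89 c98 : Int),
    num7 ≤ s → s + xs.length ≤ num7 + num8 →
    (PySem.List.enumerate xs s).foldl (fun c p => pvCoreA num7 num8 c p.1 p.2)
        (c78, c87, c79, c97, c89, c98)
      = (c78, c87 + xs.count 7, c79, c97, c89 + xs.count 9, c98) := by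
  induction xs with
  | nil => simp [PySem.List.enumerate_nil]
  | cons x xs ih =>
    intro s c78 c87 c79 c97 c89 c98 hlo hhi
    rw [List.length_cons] at hhi
    push_cast at hhi
    have h1 : ¬ s < num7 := by omega
    have h2 : s < num7 + num8 := by omega
    rw [PySem.List.enumerate_cons, List.foldl_cons]
    have hstep : pvCoreA num7 num8 (c78, c87, c79, c97, c89, c98) s x
        = (c78, c87 + (if x = 7 then 1 else 0), c79, c97, c89 + (if x = 9 then 1 else 0), c98) := by
      simp only [pvCoreA, if_neg h1, if_pos h2]
      split_ifs <;> simp_all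
    rw [hstep, ih (s + 1) _ _ _ _ _ _ (by omega) (by omega)]
    simp only [List.count_cons, Prod.mk.injEq]
    push_cast
    split_ifs <;> simp_all <;> omega

-- region 3: every index is ≥ num7 + num8, the loop only counts 7s and 8s
theorem foldA_region3 (num7 num8 : Int) (hn8 : 0 ≤ num8) (xs : List Int) :
    ∀ (s : Int) (c78 c87 c79 c97 c89 c98 : Int), num7 + num8 ≤ s →
    (PySem.List.enumerate xs s).foldl (fun c p => pvCoreA num7 num8 c p.1 p.2)
        (c78, c87, c79, c97, c89, c98)
      = (c78, c87, c79, c97 + xs.count 7, c89, c98 + xs.count 8) := by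
  induction xs with
  | nil => simp [PySem.List.enumerate_nil]
  | cons x xs ih =>
    intro s c78 c87 c79 c97 c89 c98 hs
    have h1 : ¬ s < num7 := by omega
    have h2 : ¬ s < num7 + num8 := by omega
    rw [PySem.List.enumerate_cons, List.foldl_cons]
    have hstep : pvCoreA num7 num8 (c78, c87, c79, c97, c89, c98) s x
        = (c78, c87, c79, c97 + (if x = 7 then 1 else 0), c89, c98 + (if x = 8 then 1 else 0)) := by
      simp only [pvCoreA, if_neg h1, if_neg h2]
      split_ifs <;> simp_all
    rw [hstep, ih (s + 1) _ _ _ _ _ _ (by omega)]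
    simp only [List.count_cons, Prod.mk.injEq]
    push_cast
    split_ifs <;> simp_all <;> omega

-- bridge: A's index loop over range(n) is a fold over the enumeration of the list
theorem foldA_enum (sequence : List Int) (n7 n8 : Int) :
    (PySem.List.pyRange 0 (PySem.List.len sequence) 1).foldl
        (fun c i => pvCoreA n7 n8 c i (PySem.List.pyGetD sequence i 0))
        ((0 : Int), (0 : Int), (0 : Int), (0 : Int), (0 : Int), (0 : Int))
      = (PySem.List.enumerate sequence 0).foldl (fun c p => pvCoreA n7 n8 c p.1 p.2)
          ((0 : Int), (0 : Int), (0 : Int), (0 : Int), (0 : Int), (0 : Int)) := by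
  rw [PySem.List.enumerate_eq_map_pyRange (d := 0), List.foldl_map]

-- the loop's final counters, expressed as counts over the three regions
theorem foldA_split (sequence : List Int) (n7 n8 : Nat) (h : n7 + n8 ≤ sequence.length) :
    (PySem.List.enumerate sequence 0).foldl
        (fun c p => pvCoreA (n7 : Int) (n8 : Int) c p.1 p.2)
        ((0 : Int), (0 : Int), (0 : Int), (0 : Int), (0 : Int), (0 : Int))
      = (((sequence.take n7).count 8 : Int), (((sequence.drop n7).take n8).count 7 : Int),
         ((sequence.take n7).count 9 : Int), ((sequence.drop (n7 + n8)).count 7 : Int),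
         (((sequence.drop n7).take n8).count 9 : Int), ((sequence.drop (n7 + n8)).count 8 : Int)) := by
  have ht7 : (sequence.take n7).length = n7 := by
    rw [List.length_take]
    omega
  have htm : ((sequence.drop n7).take n8).length = n8 := by
    rw [List.length_take, List.length_drop]
    omega
  have hsplit : sequence =
      sequence.take n7 ++ ((sequence.drop n7).take n8 ++ sequence.drop (n7 + n8)) := by
    rw [← List.drop_drop]
    simp
  conv_lhs => rw [hsplit]
  rw [PySem.List.enumerate_append, List.foldl_append,
      foldA_region1 (n7 : Int) (n8 : Int) _ 0 0 0 0 0 0 0 (by rw [ht7]; omega),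
      PySem.List.enumerate_append, List.foldl_append,
      foldA_region3 (n7 : Int) (n8 : Int) (by positivity) _
        ((0 : Int) + ((sequence.take n7).length : Int)
          + (((sequence.drop n7).take n8).length : Int)) _ _ _ _ _ _
        (by rw [ht7, htm]; omega),
      foldA_region2 (n7 : Int) (n8 : Int) _
        ((0 : Int) + ((sequence.take n7).length : Int)) _ _ _ _ _ _
        (by rw [ht7]; omega) (by rw [ht7, htm]; omega)]
  simp

-- A's result in closed form over the two relevant regions
theorem exchangeA_closed (sequence : List Int) :
    exchange_sort_gemini_cot sequence =
      max ((sequence.take (sequence.count 7)).count 8 : Int)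
          (((sequence.drop (sequence.count 7)).take (sequence.count 8)).count 7 : Int)
      + max 0 (((sequence.take (sequence.count 7)).count 9 : Int)
               + (((sequence.drop (sequence.count 7)).take (sequence.count 8)).count 9 : Int)
               - max ((sequence.take (sequence.count 7)).count 8 : Int)
                     (((sequence.drop (sequence.count 7)).take (sequence.count 8)).count 7 : Int)) := by
  have hperm := PySem.List.sorted_perm sequence (id : Int → Int) false
  have hc7 : PySem.List.count (PySem.List.sorted sequence id false) 7
      = ((sequence.count 7 : Nat) : Int) := by
    rw [PySem.List.count_eq, hperm.count_eq]
  have hc8 : PySem.List.count (PySem.List.sorted sequence id false) 8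
      = ((sequence.count 8 : Nat) : Int) := by
    rw [PySem.List.count_eq, hperm.count_eq]
  simp only [exchange_sort_gemini_cot, hc7, hc8, foldA_enum,
    foldA_split sequence (sequence.count 7) (sequence.count 8)
      (count7_add_count8_le_length sequence)]

-- ===== VERDICT =====
theorem exchange_sort_gemini_cot_spec : Claim_equal_exchange_sort_gemini_cot := by
  intro sequence _
  unfold Spec_exchange_sort_gemini_cot
  rw [exchangeA_closed]
  have hadd : ((sequence.count 7 : Nat) : Int) + ((sequence.count 8 : Nat) : Int)
      = ((sequence.count 7 + sequence.count 8 : Nat) : Int) := by push_cast; ring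
  simp only [exchange_sort_gemini_cot_alt, PySem.List.count_eq,
    PySem.List.slice_natCast_add]
  simp only [hadd, PySem.List.slice_to_natCast, List.take_add, List.count_append]
  push_cast
  omega
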